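-- pv_equiv track=rewrite | github.com/avidadearthur/cs50ide | buildingblocks/pset6/dna/dna.py | longest_run
-- ===== SOURCE A (Python) =====
-- def longest_run(string, STRs):
--     # STRs is the list of substrings to be searched
--     # (the substrings).
--     #dictionary of substr's.
--     substrs = {}
--
--     for STR in STRs:
--         highestSubCount = 0
--         subCount, start, last_location, location, next_location = 0, 0, 0, 0, 0
--         while True:
--
--             location = string.find(STR, start)
--
--             next_location = string.find(STR, location+len(STR))
--
--             if location == -1: # end of string ?
--                 break
--             # no. continue:
--
--             if next_location != -1: # next location is not out of range
--
--                 # avoid double counting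
--                 if last_location + len(STR) != location:
--                     if subCount > highestSubCount:
--                         highestSubCount = subCount
--                     subCount = 0 # start counting again
--
--                 # if the current occurence location is right after len(STR) chars of
--                 # the last ocurrence location, we have consecutive occurences.
--
--                 # OR if the next occurence location is right after len(STR) chars of
--                 # the current ocurrence location, we have consecutive occurences.
--                 if ((location - last_location) == len(STR)) or ((next_location - location) == len(STR)):
--                     subCount += 1
--
--                     if subCount > highestSubCount:
--                         highestSubCount = subCount
--
--                 else:
--                     subCount = 0 # start counting again
--
--             elif next_location == -1: # next location is out of range
--                 # just consider the last and the current occurence loactions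
--                 if ((location - last_location) == len(STR)):
--                     subCount += 1
--
--                     if subCount > highestSubCount:
--                         highestSubCount = subCount
--
--                 else:
--                     subCount = 0 # start counting again
--
--             last_location = location
--
--             # continue looking from the end of the
--             # last found substring.
--             start = location + len(STR)
--
--         if highestSubCount == 0: # STR didn't appear more than once
--             highestSubCount = 1
--
--         substrs[STR] = highestSubCount
--
--     return substrs
-- ===== SOURCE B (Python) =====
-- def longest_run(string, STRs):
--     substrs = {}
--     for STR in STRs:
--         m = len(STR)
--         # pass 1: collect all non-overlapping occurrence start indices
--         locs = []
--         start = 0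
--         while True:
--             loc = string.find(STR, start)
--             if loc == -1:
--                 break
--             locs.append(loc)
--             start = loc + m
--         # pass 2: longest streak of consecutive indices exactly m apart
--         best = 1
--         run = 1
--         for prev, cur in zip(locs, locs[1:]):
--             if cur - prev == m:
--                 run += 1
--                 if run > best:
--                     best = run
--             else:
--                 run = 1
--         substrs[STR] = best
--     return substrs
-- ===== Notes on version B (the rewrite author's own statement) =====
-- stated objective: simpler
-- what changed: A's single while-loop interleaves find, a lookahead find, a double-counting guard and three counters; B decomposes the task into two plain passes per STR: collect all non-overlapping occurrence indices with find, then scan adjacent index pairs for the longest streak of gaps of exactly len(STR), with best initialised to 1 reproducing A's max(...,1) clamp.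
import Mathlib
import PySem

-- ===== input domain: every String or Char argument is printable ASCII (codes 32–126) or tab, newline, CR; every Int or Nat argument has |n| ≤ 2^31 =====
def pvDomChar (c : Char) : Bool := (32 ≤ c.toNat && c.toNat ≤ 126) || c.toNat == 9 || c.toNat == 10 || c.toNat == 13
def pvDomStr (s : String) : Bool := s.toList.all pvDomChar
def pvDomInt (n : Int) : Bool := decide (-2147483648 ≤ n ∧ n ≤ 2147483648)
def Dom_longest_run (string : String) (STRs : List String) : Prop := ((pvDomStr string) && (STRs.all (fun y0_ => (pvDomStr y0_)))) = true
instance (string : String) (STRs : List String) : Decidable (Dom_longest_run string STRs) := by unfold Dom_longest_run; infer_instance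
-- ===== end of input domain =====

-- B replaces A's single interleaved find/lookahead state machine by two plain passes
-- (collect the non-overlapping occurrence indices, then scan adjacent pairs for the
-- longest streak of gaps of exactly len(STR)); objective: simpler, same return value.

-- ===== PORT A =====
-- Python A's 'while True' loop; each Python assignment becomes a let (the two sequential
-- conditional updates of subCount/highestSubCount become conditional lets in order).
-- fuel is only a termination device: each iteration moves 'start' forward by at least
-- len(STR) ≥ 1 (Pre_ excludes STR = ""), so fuel len(string)+1 is never exhausted
-- on admitted inputs (proved in pvLoop_eq_aGo below).
def longest_run_loop (s STR : String) (m : Int) : Nat → Int → Int → Int → Int → Int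
  | 0, _, _, _, highestSubCount => highestSubCount
  | fuel+1, start, last_location, subCount, highestSubCount =>
    let location := PySem.Str.findFrom s STR start
    let next_location := PySem.Str.findFrom s STR (location + m)
    if location = -1 then highestSubCount
    else if next_location ≠ -1 then
      -- avoid double counting
      let highestSubCount :=
        if last_location + m ≠ location then
          (if subCount > highestSubCount then subCount else highestSubCount)
        else highestSubCount
      let subCount := if last_location + m ≠ location then 0 else subCount
      let subCount' :=
        if location - last_location = m ∨ next_location - location = m then subCount + 1 else 0
      let highestSubCount :=
        if location - last_location = m ∨ next_location - location = m then
          (if subCount' > highestSubCount then subCount' else highestSubCount)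
        else highestSubCount
      longest_run_loop s STR m fuel (location + m) location subCount' highestSubCount
    else
      let subCount' := if location - last_location = m then subCount + 1 else 0
      let highestSubCount :=
        if location - last_location = m then
          (if subCount' > highestSubCount then subCount' else highestSubCount)
        else highestSubCount
      longest_run_loop s STR m fuel (location + m) location subCount' highestSubCount

def longest_run (string : String) (STRs : List String) : List (String × Int) :=
  (STRs.foldl (fun substrs STR =>
      let m := PySem.Str.len STR
      let highestSubCount := longest_run_loop string STR m (string.toList.length + 1) 0 0 0 0
      let highestSubCount := if highestSubCount = 0 then 1 else highestSubCount
      substrs.insert STR highestSubCount)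
    (PySem.Dict.empty : PySem.Dict String Int)).items

-- ===== PORT B =====
-- pass 1 of Source B: collect all non-overlapping occurrence start indices
-- (same fuel device as A's loop; never exhausted when STR ≠ "")
def longest_run_collect (s STR : String) (m : Int) : Nat → Int → List Int → List Int
  | 0, _, locs => locs
  | fuel+1, start, locs =>
    let loc := PySem.Str.findFrom s STR start
    if loc = -1 then locs
    else longest_run_collect s STR m fuel (loc + m) (locs ++ [loc])

-- body of Source B's 'for prev, cur in zip(locs, locs[1:])' loop, state (best, run)
def longest_run_step (m : Int) (st : Int × Int) (pc : Int × Int) : Int × Int :=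
  if pc.2 - pc.1 = m then
    let run := st.2 + 1
    (if run > st.1 then run else st.1, run)
  else (st.1, 1)

def longest_run_alt (string : String) (STRs : List String) : List (String × Int) :=
  (STRs.foldl (fun substrs STR =>
      let m := PySem.Str.len STR
      let locs := longest_run_collect string STR m (string.toList.length + 1) 0 []
      let st := (List.zip locs (PySem.List.slice locs (some 1) none)).foldl
        (longest_run_step m) (1, 1)
      substrs.insert STR st.1)
    (PySem.Dict.empty : PySem.Dict String Int)).items

-- ===== PRECONDITION & SPEC =====
-- Pre_ excludes an empty search substring, on which Python A (and B) loop forever: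
-- string.find("", start) never returns -1.
def Pre_longest_run (string : String) (STRs : List String) : Prop := ∀ STR ∈ STRs, STR ≠ ""
instance (string : String) (STRs : List String) : Decidable (Pre_longest_run string STRs) := by unfold Pre_longest_run; infer_instance
def pvWitness_longest_run : String × List String := ("AGATAGATXAGAT", ["AGAT", "X", "TT"])

def Spec_longest_run (string : String) (STRs : List String) (out : List (String × Int)) : Prop := out = longest_run_alt string STRs
instance (string : String) (STRs : List String) (out : List (String × Int)) : Decidable (Spec_longest_run string STRs out) := by unfold Spec_longest_run; infer_instance

-- ===== CLAIM (what is proved, stated in full; the proofs are below) =====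
def Claim_equal_longest_run : Prop := ∀ (string : String) (STRs : List String), Dom_longest_run string STRs → Pre_longest_run string STRs → Spec_longest_run string STRs (longest_run string STRs)

-- ===== LEMMAS AND PROOFS =====

-- proof-side model of the occurrence list (B's collect pass without its accumulator)
def pvClocs (s STR : String) (m : Int) : Nat → Int → List Int
  | 0, _ => []
  | fuel+1, start =>
    let loc := PySem.Str.findFrom s STR start
    if loc = -1 then [] else loc :: pvClocs s STR m fuel (loc + m)

-- A's per-occurrence state update (next exists), flattened: new subCount / highestSubCount
def pvSub2 (m l nl last sub : Int) : Int :=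
  if l - last = m ∨ nl - l = m then (if last + m ≠ l then 0 else sub) + 1 else 0
def pvBest1 (m l last sub best : Int) : Int :=
  if last + m ≠ l then (if sub > best then sub else best) else best
def pvBest2 (m l nl last sub best : Int) : Int :=
  if l - last = m ∨ nl - l = m then
    (if pvSub2 m l nl last sub > pvBest1 m l last sub best then pvSub2 m l nl last sub
     else pvBest1 m l last sub best)
  else pvBest1 m l last sub best

-- proof-side model of A's loop as a function of the occurrence list
def pvAGo (m : Int) : List Int → Int → Int → Int → Int
  | [], _, _, best => best
  | [l], last, sub, best =>
      if l - last = m then (if sub + 1 > best then sub + 1 else best) else best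
  | l :: nl :: rest, last, sub, best =>
      pvAGo m (nl :: rest) l (pvSub2 m l nl last sub) (pvBest2 m l nl last sub best)

theorem pvClocs_step (s STR : String) (m : Int) (fuel : Nat) (start : Int) :
    pvClocs s STR m (fuel+1) start =
      (let loc := PySem.Str.findFrom s STR start
       if loc = -1 then [] else loc :: pvClocs s STR m fuel (loc + m)) := rfl

theorem pvCollect_acc (s STR : String) (m : Int) :
    ∀ (fuel : Nat) (start : Int) (acc : List Int),
      longest_run_collect s STR m fuel start acc = acc ++ pvClocs s STR m fuel start := by
  intro fuel
  induction fuel with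
  | zero => intro start acc; simp [longest_run_collect, pvClocs]
  | succ n ih =>
    intro start acc
    simp only [longest_run_collect, pvClocs]
    split
    · simp
    · rw [ih]; simp

-- one unfolding of A's loop, with the two conditional state updates flattened
theorem pvLoop_step' (s STR : String) (m : Int) (fuel : Nat) (start last sub best : Int) :
    longest_run_loop s STR m (fuel+1) start last sub best =
      (let location := PySem.Str.findFrom s STR start
       let next_location := PySem.Str.findFrom s STR (location + m)
       if location = -1 then best
       else if next_location ≠ -1 then
         longest_run_loop s STR m fuel (location + m) location
           (pvSub2 m location next_location last sub)
           (pvBest2 m location next_location last sub best)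
       else
         longest_run_loop s STR m fuel (location + m) location
           (if location - last = m then sub + 1 else 0)
           (if location - last = m then (if sub + 1 > best then sub + 1 else best) else best)) := by
  show (let location := PySem.Str.findFrom s STR start
        let next_location := PySem.Str.findFrom s STR (location + m)
        if location = -1 then best
        else if next_location ≠ -1 then
          let highestSubCount :=
            if last + m ≠ location then (if sub > best then sub else best) else best
          let subCount := if last + m ≠ location then 0 else sub
          let subCount' :=
            if location - last = m ∨ next_location - location = m then subCount + 1 else 0
          let highestSubCount :=
            if location - last = m ∨ next_location - location = m then
              (if subCount' > highestSubCount then subCount' else highestSubCount)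
            else highestSubCount
          longest_run_loop s STR m fuel (location + m) location subCount' highestSubCount
        else
          let subCount' := if location - last = m then sub + 1 else 0
          let highestSubCount :=
            if location - last = m then
              (if subCount' > best then subCount' else best)
            else best
          longest_run_loop s STR m fuel (location + m) location subCount' highestSubCount) = _
  simp only [pvBest2, pvBest1, pvSub2]
  split_ifs <;> rfl

-- A's fueled loop computes pvAGo of the occurrence list while the fuel bound holds
theorem pvLoop_eq_aGo (s STR : String) (m : Int)
    (hm : m = (STR.toList.length : Int)) (hm1 : 1 ≤ m) :
    ∀ (fuel : Nat) (start : Nat) (last sub best : Int),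
      start ≤ s.toList.length → (s.toList.length : Int) + 1 ≤ (start : Int) + (fuel : Int) →
      longest_run_loop s STR m fuel (start : Int) last sub best
        = pvAGo m (pvClocs s STR m fuel (start : Int)) last sub best := by
  intro fuel
  induction fuel with
  | zero =>
    intro start last sub best hs hf
    exfalso; push_cast at hf; omega
  | succ fuel ih =>
    intro start last sub best hs hf
    rw [pvLoop_step', pvClocs_step]
    by_cases h1 : PySem.Str.findFrom s STR (start : Int) = -1
    · simp only [h1, if_true, pvAGo]
    · -- an occurrence was found
      have h1' : PySem.Chars.findFrom s.toList STR.toList (start : Int) ≠ -1 := by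
        simpa [PySem.Str.findFrom_eq] using h1
      obtain ⟨hk1, hk2, -⟩ :=
        PySem.Chars.findFrom_natCast_spec s.toList STR.toList start hs h1'
      set loc := PySem.Str.findFrom s STR (start : Int) with hlocdef
      have hloceq : loc = PySem.Chars.findFrom s.toList STR.toList (start : Int) := by
        rw [hlocdef, PySem.Str.findFrom_eq]
      rw [← hloceq] at hk1 hk2 h1'
      have hloc0 : 0 ≤ loc := le_trans (by positivity) hk1
      have hlen : STR.toList.length ≤ s.toList.length - loc.toNat := by
        simpa using hk2.length_le
      have hlocm : loc.toNat + STR.toList.length ≤ s.toList.length := by omega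
      have hcast : loc + m = ((loc.toNat + STR.toList.length : Nat) : Int) := by
        push_cast [hm]; omega
      -- the fuel is never exhausted while occurrences remain
      cases fuel with
      | zero =>
        exfalso
        have : (start : Int) ≤ loc := hk1
        push_cast at hf
        omega
      | succ fuel' =>
        have ihk := ih (loc.toNat + STR.toList.length)
        rw [← hcast] at ihk
        have hk'1 : loc.toNat + STR.toList.length ≤ s.toList.length := hlocm
        have hk'2 : (s.toList.length : Int) + 1 ≤ loc + m + ((fuel' + 1 : Nat) : Int) := by
          have : (start : Int) ≤ loc := hk1
          push_cast at hf ⊢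
          omega
        by_cases h2 : PySem.Str.findFrom s STR (loc + m) = -1
        · -- loc is the last occurrence
          have hnil : ∀ fl, pvClocs s STR m fl (loc + m) = [] := by
            intro fl; cases fl with
            | zero => rfl
            | succ fl' => rw [pvClocs_step]; simp only [h2, if_true]
          simp only [h1, h2, if_false, hnil, pvAGo]
          exact (ihk loc _ _ hk'1 hk'2).trans (by rw [hnil]; simp [pvAGo])
        · -- there is a next occurrence
          have hcons : pvClocs s STR m (fuel' + 1) (loc + m)
              = PySem.Str.findFrom s STR (loc + m)
                :: pvClocs s STR m fuel' (PySem.Str.findFrom s STR (loc + m) + m) := by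
            rw [pvClocs_step]; simp only [h2, if_false]
          simp only [h1, if_false, hcons, pvAGo]
          rw [if_pos h2]
          exact (ihk loc _ _ hk'1 hk'2).trans (by rw [hcons])

-- the core invariant: A's lookahead state machine = B's pair scan, on any Int list
theorem pvAGo_eq_scan (m : Int) :
    ∀ (rest : List Int) (l last sub best run bestb : Int),
      0 ≤ sub → 0 ≤ best →
      ((last + m = l ∧ sub = run - 1 ∧ best ≤ bestb ∧ run ≤ bestb ∧ (bestb = best ∨ bestb = run)) ∨
       (¬ last + m = l ∧ run = 1 ∧ sub ≤ best ∧ best ≤ bestb ∧ 1 ≤ bestb ∧ (bestb = best ∨ bestb = 1))) →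
      (if pvAGo m (l :: rest) last sub best = 0 then 1 else pvAGo m (l :: rest) last sub best)
        = (((l :: rest).zip ((l :: rest).tail)).foldl (longest_run_step m) (bestb, run)).1 := by
  intro rest
  induction rest with
  | nil =>
    intro l last sub best run bestb hs hb hinv
    simp only [pvAGo, List.tail, List.zip_nil_right, List.foldl_nil]
    split_ifs <;> omega
  | cons nl rest ih =>
    intro l last sub best run bestb hs hb hinv
    simp only [pvAGo, List.tail_cons, List.zip_cons_cons, List.foldl_cons, longest_run_step]
    by_cases c3 : nl - l = m
    · rw [if_pos c3]
      refine ih nl l _ _ (run + 1) (if run + 1 > bestb then run + 1 else bestb) ?_ ?_ ?_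
      · unfold pvSub2; split_ifs <;> omega
      · unfold pvBest2 pvBest1 pvSub2; split_ifs <;> omega
      · unfold pvBest2 pvBest1 pvSub2; split_ifs <;> omega
    · rw [if_neg c3]
      refine ih nl l _ _ 1 bestb ?_ ?_ ?_
      · unfold pvSub2; split_ifs <;> omega
      · unfold pvBest2 pvBest1 pvSub2; split_ifs <;> omega
      · unfold pvBest2 pvBest1 pvSub2; split_ifs <;> omega

-- A's clamped answer = B's scan, from the initial states
theorem pvClamp_aGo_eq_scan (m : Int) (locs : List Int) :
    (if pvAGo m locs 0 0 0 = 0 then 1 else pvAGo m locs 0 0 0)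
      = ((locs.zip locs.tail).foldl (longest_run_step m) (1, 1)).1 := by
  cases locs with
  | nil => simp [pvAGo]
  | cons l rest =>
    exact pvAGo_eq_scan m rest l 0 0 0 1 1 le_rfl le_rfl (by omega)

-- per-STR: A's clamped loop value = B's collect-then-scan value
theorem pvValue_eq (s STR : String) (hne : STR ≠ "") :
    (if longest_run_loop s STR (PySem.Str.len STR) (s.toList.length + 1) 0 0 0 0 = 0 then 1
     else longest_run_loop s STR (PySem.Str.len STR) (s.toList.length + 1) 0 0 0 0)
    = (let locs := longest_run_collect s STR (PySem.Str.len STR) (s.toList.length + 1) 0 []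
       ((List.zip locs (PySem.List.slice locs (some 1) none)).foldl
         (longest_run_step (PySem.Str.len STR)) (1, 1)).1) := by
  have hm : PySem.Str.len STR = (STR.toList.length : Int) := PySem.Str.len_eq STR
  have hm1 : 1 ≤ PySem.Str.len STR := by
    rw [hm]
    have : STR.toList ≠ [] := fun h => hne (String.toList_eq_nil_iff.mp h)
    have := List.length_pos_iff.mpr this
    omega
  have hl := pvLoop_eq_aGo s STR (PySem.Str.len STR) hm hm1 (s.toList.length + 1) 0 0 0 0
    (by omega) (by push_cast; omega)
  simp only [Nat.cast_zero] at hl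
  simp only [pvCollect_acc, List.nil_append, PySem.List.slice_from_one]
  rw [hl]
  exact pvClamp_aGo_eq_scan (PySem.Str.len STR) (pvClocs s STR (PySem.Str.len STR) (s.toList.length + 1) 0)

-- ===== VERDICT (by name: the statement is the Claim_ definition above) =====
theorem longest_run_spec : Claim_equal_longest_run := by
  intro s STRs _hdom hpre
  unfold Spec_longest_run longest_run longest_run_alt
  congr 1
  apply PySem.List.foldl_congr_mem
  intro d STR hmem
  simp only []
  congr 1
  exact pvValue_eq s STR (hpre STR hmem)
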